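-- pv_equiv track=rewrite | github.com/derekdomo/Practice | 2024/reddit/coding/499_maze_iii.py | findFirstLarger
-- ===== SOURCE A (Python) =====
-- def findFirstLarger(arr, target):
--     left = 0
--     right = len(arr) - 1
--     result = -1
--     while left <= right:
--         mid = left + (right-left)//2
--         if target < arr[mid]:
--             result = mid
--             right = mid - 1
--         else:
--             left = mid+1
--     return arr[result]
-- ===== SOURCE B (Python) =====
-- def findFirstLarger(arr, target):
--     ans = arr[-1]
--     for x in reversed(arr[:-1]):
--         if x <= target:
--             break
--         ans = x
--     return ans
-- ===== Notes on version B (the rewrite author's own statement) =====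
-- stated objective: alternative
-- what changed: Replaces the left/right binary search over indices by a backward scan over the trailing run of elements greater than target, carrying the current candidate value (seeded with the final element) instead of a result index; Pre_ excludes the empty list (A raises IndexError) and arrays not partitioned about target (the predicate 'x > target' not monotone along the array, i.e. binary search's precondition fails), where A's value is an accident of probe order.
-- outside the precondition, e.g. on findFirstLarger([2, 9, 1, 8], 5): A returns 9, B returns 8; on findFirstLarger([], 0): A raises IndexError, B raises IndexError
import Mathlib
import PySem

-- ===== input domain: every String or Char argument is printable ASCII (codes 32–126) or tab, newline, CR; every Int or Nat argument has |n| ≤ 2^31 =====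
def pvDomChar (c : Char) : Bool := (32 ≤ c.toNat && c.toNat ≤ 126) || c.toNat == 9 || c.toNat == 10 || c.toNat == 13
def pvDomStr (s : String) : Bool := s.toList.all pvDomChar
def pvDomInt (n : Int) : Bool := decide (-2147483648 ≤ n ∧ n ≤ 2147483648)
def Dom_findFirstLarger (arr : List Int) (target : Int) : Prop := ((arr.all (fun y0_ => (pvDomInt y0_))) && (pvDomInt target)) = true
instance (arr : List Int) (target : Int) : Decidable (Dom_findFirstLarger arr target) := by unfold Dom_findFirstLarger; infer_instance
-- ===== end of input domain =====

-- B replaces A's index-based binary search by a backward scan over the trailing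
-- run of elements greater than target, carrying the candidate value directly
-- (alternative decomposition; not faster).

-- ===== PORT A =====
-- the while loop of A; `mid` is written out inline; the Nat fuel only makes the
-- loop total (it never runs out when started with arr.length + 1)
def findFirstLargerGo (arr : List Int) (target : Int) : Nat → Int → Int → Int → Int
  | 0, _, _, result => result
  | fuel + 1, left, right, result =>
    if left ≤ right then
      if target < PySem.List.pyGetD arr (left + PySem.Int.floordiv (right - left) 2) 0 then
        findFirstLargerGo arr target fuel left (left + PySem.Int.floordiv (right - left) 2 - 1)
          (left + PySem.Int.floordiv (right - left) 2)
      else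
        findFirstLargerGo arr target fuel (left + PySem.Int.floordiv (right - left) 2 + 1) right result
    else result

def findFirstLarger (arr : List Int) (target : Int) : Int :=
  PySem.List.pyGetD arr
    (findFirstLargerGo arr target (arr.length + 1) 0 ((arr.length : Int) - 1) (-1)) 0

-- ===== PORT B =====
-- the `for x in reversed(arr[:-1])` loop: carries `ans`; `break` returns `ans`
def findFirstLargerScan (target : Int) : List Int → Int → Int
  | [], ans => ans
  | x :: xs, ans => if x ≤ target then ans else findFirstLargerScan target xs x

def findFirstLarger_alt (arr : List Int) (target : Int) : Int :=
  findFirstLargerScan target (PySem.List.slice arr none (some (-1))).reverse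
    (PySem.List.pyGetD arr (-1) 0)

-- ===== PRECONDITION & SPEC =====
-- Pre_ excludes the empty list, on which A raises IndexError at arr[result], and
-- arrays not partitioned about target (the predicate 'x > target' not monotone
-- along the array — binary search's precondition, satisfied by every sorted
-- array), on which A's value is an accident of probe order.
def Pre_findFirstLarger (arr : List Int) (target : Int) : Prop :=
  arr ≠ [] ∧ List.Pairwise (fun a b => target < a → target < b) arr
instance (arr : List Int) (target : Int) : Decidable (Pre_findFirstLarger arr target) := by
  unfold Pre_findFirstLarger; infer_instance

def pvWitness_findFirstLarger : List Int × Int := ([1, 3, 4], 2)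

def Spec_findFirstLarger (arr : List Int) (target : Int) (out : Int) : Prop :=
  out = findFirstLarger_alt arr target
instance (arr : List Int) (target : Int) (out : Int) : Decidable (Spec_findFirstLarger arr target out) := by unfold Spec_findFirstLarger; infer_instance

-- ===== CLAIM (what is proved, stated in full; the proofs are below) =====
def Claim_equal_findFirstLarger : Prop := ∀ (arr : List Int) (target : Int), Dom_findFirstLarger arr target → Pre_findFirstLarger arr target → Spec_findFirstLarger arr target (findFirstLarger arr target)

-- ===== LEMMAS AND PROOFS =====

-- characterisation of A's loop on a sorted array: starting from a state whose
-- invariant holds, it ends at -1 with everything ≤ target, or at the least index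
-- holding an element > target
lemma goA_char (arr : List Int) (target : Int)
    (hs : ∀ i j : Nat, i < j → j < arr.length → target < arr.getD i 0 → target < arr.getD j 0) :
    ∀ (fuel : Nat) (left right result : Int),
    (right + 1 - left).toNat ≤ fuel →
    0 ≤ left → right < (arr.length : Int) → left ≤ right + 1 →
    (∀ i : Nat, (i : Int) < left → arr.getD i 0 ≤ target) →
    ((result = -1 ∧ right = (arr.length : Int) - 1) ∨
      (∃ jr : Nat, jr < arr.length ∧ result = (jr : Int) ∧ result = right + 1 ∧
        target < arr.getD jr 0)) →
    (findFirstLargerGo arr target fuel left right result = -1 ∧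
        ∀ i : Nat, i < arr.length → arr.getD i 0 ≤ target) ∨
      (∃ j : Nat, j < arr.length ∧
        findFirstLargerGo arr target fuel left right result = (j : Int) ∧
        target < arr.getD j 0 ∧ ∀ i : Nat, i < j → arr.getD i 0 ≤ target) := by
  intro fuel
  induction fuel with
  | zero =>
    intro left right result hfuel hl hr hlr hleft hinv
    rw [findFirstLargerGo]
    rcases hinv with ⟨hres, hright⟩ | ⟨jr, hjr, hres, hres2, hlt⟩
    · exact Or.inl ⟨hres, fun i hi => hleft i (by omega)⟩
    · exact Or.inr ⟨jr, hjr, hres, hlt, fun i hi => hleft i (by omega)⟩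
  | succ fuel ih =>
    intro left right result hfuel hl hr hlr hleft hinv
    rw [findFirstLargerGo]
    by_cases h : left ≤ right
    · rw [if_pos h]
      have e : PySem.Int.floordiv (right - left) 2 = (right - left) / 2 :=
        PySem.Int.floordiv_eq_ediv_of_pos (by omega)
      rw [e]
      have hm0 : (0:Int) ≤ left + (right - left) / 2 := by omega
      have hmr : left + (right - left) / 2 ≤ right := by omega
      have hcast : left + (right - left) / 2 = (((left + (right - left) / 2).toNat : Nat) : Int) :=
        (Int.toNat_of_nonneg hm0).symm
      have hfuel2 : (((((left + (right - left) / 2).toNat : Nat) : Int) - 1) + 1 - left).toNat ≤ fuel := by clear hinv; omega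
      have hfuel3 : (right + 1 - ((((left + (right - left) / 2).toNat : Nat) : Int) + 1)).toNat ≤ fuel := by clear hinv; omega
      rw [hcast, PySem.List.pyGetD_natCast]
      by_cases hlt : target < arr.getD (left + (right - left) / 2).toNat 0
      · rw [if_pos hlt]
        refine ih left ((((left + (right - left) / 2).toNat : Nat) : Int) - 1)
          (((left + (right - left) / 2).toNat : Nat) : Int)
          hfuel2 hl (by clear hinv; omega) (by clear hinv; omega) hleft
          (Or.inr ⟨(left + (right - left) / 2).toNat, by clear hinv; omega, rfl, by clear hinv; omega, hlt⟩)
      · rw [if_neg hlt]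
        refine ih ((((left + (right - left) / 2).toNat : Nat) : Int) + 1) right result
          hfuel3 (by clear hinv; omega) hr (by clear hinv; omega) ?_ ?_
        · intro i hi
          by_cases hil : (i : Int) < left
          · exact hleft i hil
          · have him : i ≤ (left + (right - left) / 2).toNat := by omega
            have hmlen : (left + (right - left) / 2).toNat < arr.length := by omega
            by_contra hgt
            rw [not_le] at hgt
            rcases Nat.lt_or_ge i (left + (right - left) / 2).toNat with hc | hc
            · exact hlt (hs i _ hc hmlen hgt)
            · have hieq : i = (left + (right - left) / 2).toNat := by omega
              rw [hieq] at hgt; exact hlt hgt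
        · rcases hinv with ⟨hres, hright⟩ | ⟨jr, hjr, hres, hres2, hlt2⟩
          · exact Or.inl ⟨hres, hright⟩
          · exact Or.inr ⟨jr, hjr, hres, hres2, hlt2⟩
    · rw [if_neg h]
      rcases hinv with ⟨hres, hright⟩ | ⟨jr, hjr, hres, hres2, hlt⟩
      · exact Or.inl ⟨hres, fun i hi => hleft i (by omega)⟩
      · exact Or.inr ⟨jr, hjr, hres, hlt, fun i hi => hleft i (by omega)⟩

-- B's backward scan is: last element of the leading all-greater prefix of its
-- input, with `ans` as the default
lemma scan_eq_takeWhile (target : Int) : ∀ (rl : List Int) (ans : Int),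
    findFirstLargerScan target rl ans =
      (rl.takeWhile (fun x => decide (target < x))).getLastD ans := by
  intro rl
  induction rl with
  | nil => intro ans; simp [findFirstLargerScan]
  | cons x xs ih =>
    intro ans
    by_cases h : x ≤ target
    · simp [findFirstLargerScan, h, not_lt.mpr h]
    · simp only [findFirstLargerScan, if_neg h, List.takeWhile_cons,
        decide_eq_true_eq, if_pos (not_le.mp h), List.getLastD_cons]
      exact ih x

lemma takeWhile_append_all {α : Type} (p : α → Bool) (l₁ l₂ : List α)
    (h : ∀ x ∈ l₁, p x = true) :
    (l₁ ++ l₂).takeWhile p = l₁ ++ l₂.takeWhile p := by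
  induction l₁ with
  | nil => simp
  | cons x xs ih =>
    simp only [List.cons_append, List.takeWhile_cons, h x (by simp)]
    simp [ih (fun y hy => h y (by simp [hy]))]

-- ===== VERDICT (by name: the statement is the Claim_ definition above) =====
theorem findFirstLarger_spec : Claim_equal_findFirstLarger := by
  intro arr target _hdom hpre
  unfold Spec_findFirstLarger
  obtain ⟨hne, hsorted⟩ := hpre
  have hs : ∀ i j : Nat, i < j → j < arr.length → target < arr.getD i 0 → target < arr.getD j 0 := by
    intro i j hij hj hgt
    rw [List.getD_eq_getElem arr 0 (by omega)] at hgt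
    rw [List.getD_eq_getElem arr 0 hj]
    exact (List.pairwise_iff_getElem.mp hsorted) i j (by omega) hj hij hgt
  have hlen : 0 < arr.length := List.length_pos_iff.mpr hne
  have hmain := goA_char arr target hs (arr.length + 1) 0 ((arr.length : Int) - 1) (-1)
    (by omega) (by omega) (by omega) (by omega)
    (fun i hi => absurd hi (by omega)) (Or.inl ⟨rfl, rfl⟩)
  unfold findFirstLarger findFirstLarger_alt
  rw [PySem.List.slice_to_neg_one, scan_eq_takeWhile]
  rcases hmain with ⟨hR, hall⟩ | ⟨j, hj, hR, hlt, hleast⟩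
  · -- no element is larger: the backward scan breaks at once (or the prefix is
    -- empty) and A's -1 wraps to the same arr[-1]
    rw [hR]
    have hmem : ∀ x ∈ arr.dropLast, ¬ (target < x) := by
      intro x hx
      obtain ⟨i, hi, heq⟩ := List.getElem_of_mem ((List.dropLast_sublist arr).mem hx)
      have := hall i hi
      rw [List.getD_eq_getElem arr 0 hi, heq] at this
      omega
    have : (arr.dropLast.reverse.takeWhile (fun x => decide (target < x))) = [] := by
      apply List.takeWhile_eq_nil_iff.mpr
      intro h0
      simp only [decide_eq_true_eq]
      exact hmem _ (List.mem_reverse.mp (List.getElem_mem h0))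
    rw [this]
    rfl
  · -- arr[j] is the first (hence, by the partition, leftmost of the trailing run
    -- of) element larger than target; both sides return it
    rw [hR, PySem.List.pyGetD_natCast]
    have hsuffix : ∀ i : Nat, j ≤ i → i < arr.length → target < arr.getD i 0 := by
      intro i hji hi
      rcases Nat.lt_or_ge j i with hc | hc
      · exact hs j i hc hi hlt
      · have : i = j := by omega
        rw [this]; exact hlt
    have hdl : ∀ (i : Nat) (h : i < arr.length - 1),
        arr.dropLast[i]'(by simp only [List.length_dropLast]; omega) = arr[i]'(by omega) := by
      intro i h
      exact List.getElem_dropLast (by simp only [List.length_dropLast]; omega)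
    have hlast : PySem.List.pyGetD arr (-1) 0 = arr.getD (arr.length - 1) 0 := by
      rw [PySem.List.pyGetD_neg_one arr 0 hne, List.getLast_eq_getElem hne,
        List.getD_eq_getElem arr 0 (by omega)]
    -- split the scanned prefix arr[:-1] at j
    have hsplit : arr.dropLast = arr.dropLast.take j ++ arr.dropLast.drop j :=
      (List.take_append_drop j arr.dropLast).symm
    rw [hsplit, List.reverse_append,
      takeWhile_append_all _ _ _ (by
        intro x hx
        obtain ⟨i, hi, rfl⟩ := List.getElem_of_mem (List.mem_reverse.mp hx)
        have hilen : j + i < arr.length - 1 := by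
          have := hi; simp only [List.length_drop, List.length_dropLast] at this
          omega
        rw [List.getElem_drop, hdl _ hilen]
        have := hsuffix (j + i) (by omega) (by omega)
        rw [List.getD_eq_getElem arr 0 (by omega)] at this
        simpa using this)]
    have hw : (arr.dropLast.take j).reverse.takeWhile (fun x => decide (target < x)) = [] := by
      apply List.takeWhile_eq_nil_iff.mpr
      intro h0
      simp only [decide_eq_true_eq, List.get_eq_getElem]
      have hmem := List.mem_reverse.mp (List.getElem_mem h0)
      obtain ⟨i, hi, heq⟩ := List.getElem_of_mem hmem
      have hij : i < j := by
        have := hi; simp only [List.length_take] at this; omega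
      have hile : i < arr.length - 1 := by
        have := hi; simp only [List.length_take, List.length_dropLast] at this; omega
      rw [List.getElem_take, hdl _ hile] at heq
      have := hleast i hij
      rw [List.getD_eq_getElem arr 0 (by omega)] at this
      rw [← heq]
      omega
    rw [hw]
    -- the kept run is (arr[:-1].drop j).reverse; its last default is arr[j]
    rcases hcase : arr.dropLast.drop j with _ | ⟨z, t⟩
    · -- the run is empty: j = arr.length - 1 and the default arr[-1] is arr[j]
      have hjlen : arr.length - 1 ≤ j := by
        have := congrArg List.length hcase
        simp only [List.length_drop, List.length_dropLast, List.length_nil] at this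
        omega
      have hj1 : j = arr.length - 1 := by omega
      simp only [List.reverse_nil, List.nil_append, List.getLastD_nil]
      rw [hlast, hj1]
    · -- the run starts with z = arr[j]
      have hz : z = arr.getD j 0 := by
        have hjd : j < arr.length - 1 := by
          by_contra hc
          have : arr.dropLast.drop j = [] := by
            apply List.drop_eq_nil_of_le
            simp only [List.length_dropLast]; omega
          rw [this] at hcase; cases hcase
        rw [List.drop_eq_getElem_cons (by simp only [List.length_dropLast]; omega)] at hcase
        injection hcase with h2 _
        rw [← h2, hdl _ (by omega), List.getD_eq_getElem arr 0 (by omega)]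
      simp only [List.reverse_cons, List.append_nil, List.getLastD_concat]
      exact hz.symm
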